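-- pv_equiv track=rewrite | github.com/khanlab/hippunfold | hippunfold/workflow/scripts/laplace-beltrami.py | find_boundary_vertices
-- ===== SOURCE A (Python) =====
-- from collections import defaultdict
--
-- def find_boundary_vertices(vertices, faces):
--     """
--     Find boundary vertices of a 3D mesh.
--
--     Args:
--         vertices (list of tuples): List of 3D points (x, y, z).
--         faces (list of tuples): List of triangular faces, where each face
--                                 is a tuple of three vertex indices (v1, v2, v3).
--
--     Returns:
--         list: List of vertex indices that are boundary vertices, sorted in ascending order.
--     """
--     edge_count = defaultdict(int)
--     # Step 1: Count edge occurrences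
--     for face in faces:
--         # Extract edges from the face, ensure consistent ordering (min, max)
--         edges = [
--             tuple(sorted((face[0], face[1]))),
--             tuple(sorted((face[1], face[2]))),
--             tuple(sorted((face[2], face[0]))),
--         ]
--         for edge in edges:
--             edge_count[edge] += 1
--     # Step 2: Identify boundary edges
--     boundary_edges = [edge for edge, count in edge_count.items() if count == 1]
--     # Step 3: Collect boundary vertices
--     boundary_vertices = set()
--     for edge in boundary_edges:
--         boundary_vertices.update(edge)
--     # Convert the set to a sorted list (array)
--     return sorted(boundary_vertices)
-- ===== SOURCE B (Python) =====
-- def find_boundary_vertices(vertices, faces):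
--     """
--     Find boundary vertices of a 3D mesh.
--
--     Builds the canonical edge list, sorts it, and walks runs of equal edges:
--     an edge whose run has length 1 is a boundary edge, and its two endpoints
--     are boundary vertices. Returns the sorted list of distinct boundary vertices.
--     """
--     edges = []
--     for a, b, c in faces:
--         edges.append((a, b) if a <= b else (b, a))
--         edges.append((b, c) if b <= c else (c, b))
--         edges.append((c, a) if c <= a else (a, c))
--     edges.sort()
--     boundary = set()
--     n = len(edges)
--     i = 0
--     while i < n:
--         e = edges[i]
--         j = i + 1
--         while j < n and edges[j] == e:
--             j += 1
--         if j == i + 1: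
--             boundary.add(e[0])
--             boundary.add(e[1])
--         i = j
--     return sorted(boundary)
-- ===== Notes on version B (the rewrite author's own statement) =====
-- stated objective: alternative
-- what changed: Replaces A's defaultdict edge counting plus items-filter with building the canonical edge list once, sorting it, and scanning consecutive runs: an edge forming a run of length 1 is a boundary edge and yields its endpoints.
import Mathlib
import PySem

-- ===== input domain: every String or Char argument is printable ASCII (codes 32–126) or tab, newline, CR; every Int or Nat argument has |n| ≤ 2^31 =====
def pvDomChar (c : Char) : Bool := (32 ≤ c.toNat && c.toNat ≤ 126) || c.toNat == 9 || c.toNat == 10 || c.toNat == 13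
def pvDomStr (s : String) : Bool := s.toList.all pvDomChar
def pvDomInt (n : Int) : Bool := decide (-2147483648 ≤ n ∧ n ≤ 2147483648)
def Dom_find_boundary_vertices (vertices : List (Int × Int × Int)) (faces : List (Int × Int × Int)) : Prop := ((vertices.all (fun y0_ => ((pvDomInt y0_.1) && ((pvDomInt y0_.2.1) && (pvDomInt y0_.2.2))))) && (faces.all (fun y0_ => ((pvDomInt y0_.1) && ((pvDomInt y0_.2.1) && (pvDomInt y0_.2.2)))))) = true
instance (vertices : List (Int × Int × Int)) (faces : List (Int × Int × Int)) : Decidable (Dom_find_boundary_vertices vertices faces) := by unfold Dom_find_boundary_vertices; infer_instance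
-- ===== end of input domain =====

-- B replaces A's defaultdict edge counting with a sort-then-group pass over the canonical edge
-- list (objective: alternative algorithm of similar cost).

-- Shared by both ports: the canonical (min, max) form of an edge.
-- A writes it as tuple(sorted((u, v))) on a 2-tuple, B as '(u, v) if u <= v else (v, u)';
-- on two ints both are literally this conditional (Python's 2-element sort is this comparison).
def pvMinMax (a b : Int) : Int × Int := if a ≤ b then (a, b) else (b, a)

-- the three canonical edges of one face, in A's (and B's) order
def pvFaceEdges (f : Int × Int × Int) : List (Int × Int) :=
  [pvMinMax f.1 f.2.1, pvMinMax f.2.1 f.2.2, pvMinMax f.2.2 f.1]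

-- ===== PORT A =====
def find_boundary_vertices (vertices : List (Int × Int × Int)) (faces : List (Int × Int × Int)) : List Int :=
  -- Step 1: count edge occurrences (defaultdict(int): edge_count[edge] += 1)
  let edge_count : PySem.Dict (Int × Int) Int :=
    faces.foldl (fun d face =>
      (pvFaceEdges face).foldl (fun d e => d.insert e (d.getD e 0 + 1)) d) PySem.Dict.empty
  -- Step 2: boundary edges = those with count == 1
  let boundary_edges : List (Int × Int) :=
    (edge_count.items.filter (fun p => p.2 == (1 : Int))).map Prod.fst
  -- Step 3: collect boundary vertices into a set, then sorted(...)
  let boundary_vertices : PySem.Set Int :=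
    boundary_edges.foldl (fun s e => PySem.Set.update s [e.1, e.2]) PySem.Set.empty
  PySem.List.sorted boundary_vertices (fun x => x) false

-- ===== PORT B =====
-- B's two nested while loops over the sorted array (outer: one run per iteration; inner:
-- advance j past the run) become recursion consuming the sorted list run by run:
-- takeWhile/dropWhile of the run is the inner 'while edges[j] == e: j += 1', and
-- 'j == i + 1' is 'the run after e is empty'.
def pvCollectRuns : List (Int × Int) → PySem.Set Int → PySem.Set Int
  | [], boundary => boundary
  | e :: rest, boundary =>
    if rest.takeWhile (fun x => x == e) = [] then
      pvCollectRuns (rest.dropWhile (fun x => x == e)) ((PySem.Set.add boundary e.1).add e.2)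
    else
      pvCollectRuns (rest.dropWhile (fun x => x == e)) boundary
  termination_by l _ => l.length
  decreasing_by
    · exact Nat.lt_succ_of_le (List.length_dropWhile_le _ _)
    · exact Nat.lt_succ_of_le (List.length_dropWhile_le _ _)

def find_boundary_vertices_alt (vertices : List (Int × Int × Int)) (faces : List (Int × Int × Int)) : List Int :=
  -- build the canonical edge list (three appends per face)
  let edges : List (Int × Int) :=
    faces.foldl (fun acc face => acc ++ pvFaceEdges face) []
  -- edges.sort(): list sort on int pairs is lexicographic
  let sortedEdges := PySem.List.sorted2 edges Prod.fst Prod.snd false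
  -- scan runs, collecting endpoints of length-1 runs into a set, then sorted(...)
  PySem.List.sorted (pvCollectRuns sortedEdges PySem.Set.empty) (fun x => x) false

-- ===== PRECONDITION & SPEC =====
def Spec_find_boundary_vertices (vertices : List (Int × Int × Int)) (faces : List (Int × Int × Int)) (out : List Int) : Prop := out = find_boundary_vertices_alt vertices faces
instance (vertices : List (Int × Int × Int)) (faces : List (Int × Int × Int)) (out : List Int) : Decidable (Spec_find_boundary_vertices vertices faces out) := by unfold Spec_find_boundary_vertices; infer_instance

-- ===== CLAIM (what is proved, stated in full; the proofs are below) =====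
def Claim_equal_find_boundary_vertices : Prop := ∀ (vertices : List (Int × Int × Int)) (faces : List (Int × Int × Int)), Dom_find_boundary_vertices vertices faces → Spec_find_boundary_vertices vertices faces (find_boundary_vertices vertices faces)

-- ===== LEMMAS AND PROOFS =====

-- A's counting loop over faces is Counter(all canonical edges)
theorem pv_dict_eq_counter (faces : List (Int × Int × Int)) :
    faces.foldl (fun d face =>
        (pvFaceEdges face).foldl (fun d e => d.insert e (d.getD e 0 + 1)) d) PySem.Dict.empty
      = PySem.Dict.counter (faces.flatMap pvFaceEdges) := by
  rw [← PySem.Dict.foldl_insert_getD_add_one_eq_counter, List.foldl_flatMap]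

-- membership in A's boundary_edges list
theorem pv_mem_boundary_edges (E : List (Int × Int)) (e : Int × Int) :
    e ∈ (((PySem.Dict.counter E).items.filter (fun p => p.2 == (1 : Int))).map Prod.fst)
      ↔ e ∈ E ∧ E.count e = 1 := by
  rw [PySem.Dict.items_counter]
  simp only [List.filter_map, List.map_map, List.mem_map, List.mem_filter, Function.comp]
  constructor
  · rintro ⟨a, ⟨ha, hc⟩, rfl⟩
    rw [PySem.Set.mem_ofList] at ha
    simp only [beq_iff_eq] at hc
    exact ⟨ha, by exact_mod_cast hc⟩
  · rintro ⟨he, hc⟩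
    exact ⟨e, ⟨(PySem.Set.mem_ofList E e).2 he, by simp [hc]⟩, rfl⟩

-- membership in A's vertex-set fold
theorem pv_mem_vfold (l : List (Int × Int)) (s : PySem.Set Int) (x : Int) :
    x ∈ l.foldl (fun s e => PySem.Set.update s [e.1, e.2]) s
      ↔ x ∈ s ∨ ∃ e ∈ l, x = e.1 ∨ x = e.2 := by
  induction l generalizing s with
  | nil => simp
  | cons e t ih =>
    rw [List.foldl_cons, ih]
    simp only [PySem.Set.update, List.foldl, PySem.Set.mem_add, List.mem_cons]
    constructor
    · rintro (((h | h) | h) | ⟨f, hf, h⟩)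
      · exact Or.inl h
      · exact Or.inr ⟨e, Or.inl rfl, Or.inl h⟩
      · exact Or.inr ⟨e, Or.inl rfl, Or.inr h⟩
      · exact Or.inr ⟨f, Or.inr hf, h⟩
    · rintro (h | ⟨f, (rfl | hf), h⟩)
      · exact Or.inl (Or.inl (Or.inl h))
      · rcases h with h | h
        · exact Or.inl (Or.inl (Or.inr h))
        · exact Or.inl (Or.inr h)
      · exact Or.inr ⟨f, hf, h⟩

theorem pv_nodup_add (s : PySem.Set Int) (x : Int) (h : s.Nodup) : (s.add x).Nodup := by
  unfold PySem.Set.add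
  split
  · exact h
  · next hc =>
    simp only [PySem.Set.contains] at hc
    simp [List.nodup_append, h]
    intro a ha rfl
    exact hc (by simpa using ha)

theorem pv_nodup_vfold (l : List (Int × Int)) (s : PySem.Set Int) (h : s.Nodup) :
    (l.foldl (fun s e => PySem.Set.update s [e.1, e.2]) s).Nodup := by
  induction l generalizing s with
  | nil => exact h
  | cons e t ih =>
    exact ih _ (pv_nodup_add _ _ (pv_nodup_add _ _ h))

theorem pv_nodup_collect (l : List (Int × Int)) (s : PySem.Set Int) (h : s.Nodup) :
    (pvCollectRuns l s).Nodup := by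
  induction l, s using pvCollectRuns.induct with
  | case1 s => simpa [pvCollectRuns] using h
  | case2 e rest s hc ih =>
    rw [pvCollectRuns, if_pos hc]
    exact ih (pv_nodup_add _ _ (pv_nodup_add _ _ h))
  | case3 e rest s hc ih =>
    rw [pvCollectRuns, if_neg hc]
    exact ih h

-- sorted2 with keys (fst, snd) is sorting by the lexicographic order on pairs
theorem pv_sorted2_eq_sorted_toLex (xs : List (Int × Int)) :
    PySem.List.sorted2 xs Prod.fst Prod.snd false
      = PySem.List.sorted xs (fun e => (toLex e : Lex (Int × Int))) false := by
  unfold PySem.List.sorted2 PySem.List.sorted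
  simp only [Bool.false_eq_true, if_false]
  congr 1
  funext acc x
  congr 1
  funext a b
  by_cases h1 : a.1 < b.1 <;> by_cases h2 : b.1 < a.1 <;> by_cases h3 : a.2 < b.2 <;>
    simp [Prod.Lex.lt_iff, h1, h2, h3] <;> omega

-- nothing equal to e survives dropping e's run off a lex-sorted tail
theorem pv_run_head_ne (e : Int × Int) (rest : List (Int × Int))
    (hp1 : ∀ y ∈ rest, (toLex e : Lex (Int × Int)) ≤ toLex y)
    (hp2 : rest.Pairwise (fun a b => (toLex a : Lex (Int × Int)) ≤ toLex b)) :
    ∀ y ∈ rest.dropWhile (fun x => x == e), y ≠ e := by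
  cases hdd : rest.dropWhile (fun x => x == e) with
  | nil => simp
  | cons h tl =>
    have hh : ¬ h = e := by
      have := List.head_dropWhile_not (fun x => x == e) (l := rest) (by rw [hdd]; simp)
      simpa [hdd] using this
    have hsub : (rest.dropWhile (fun x => x == e)).Sublist rest := List.dropWhile_sublist _
    have hmemh : h ∈ rest := hsub.mem (by rw [hdd]; exact List.mem_cons_self)
    have hptl : ∀ y ∈ tl, (toLex h : Lex (Int × Int)) ≤ toLex y := by
      have := hp2.sublist hsub
      rw [hdd, List.pairwise_cons] at this
      exact this.1
    intro y hy
    rcases List.mem_cons.1 hy with rfl | hy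
    · exact hh
    · intro hye
      apply hh
      apply toLex.injective
      exact le_antisymm (hye ▸ hptl y hy) (hp1 h hmemh)

-- multiplicity of the head of a run (all of e's copies sit in 'e :: takeWhile')
theorem pv_count_self (e : Int × Int) (rest : List (Int × Int))
    (hd : ∀ y ∈ rest.dropWhile (fun x => x == e), y ≠ e) :
    (e :: rest).count e = (rest.takeWhile (fun x => x == e)).length + 1 := by
  conv_lhs => rw [← List.takeWhile_append_dropWhile (p := fun x => x == e) (l := rest)]
  rw [List.count_cons_self, List.count_append]
  have h1 : (rest.takeWhile (fun x => x == e)).count e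
      = (rest.takeWhile (fun x => x == e)).length :=
    List.count_eq_length.2 (fun b hb => by
      have hb' := List.mem_takeWhile_imp hb
      exact (beq_iff_eq.1 hb').symm)
  have h2 : (rest.dropWhile (fun x => x == e)).count e = 0 :=
    List.count_eq_zero.2 (fun h => hd e h rfl)
  omega

-- multiplicity of anything else is unchanged by dropping e's run
theorem pv_count_ne (e f : Int × Int) (rest : List (Int × Int)) (hne : f ≠ e) :
    (e :: rest).count f = (rest.dropWhile (fun x => x == e)).count f := by
  conv_lhs => rw [← List.takeWhile_append_dropWhile (p := fun x => x == e) (l := rest)]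
  have h1 : (rest.takeWhile (fun x => x == e)).count f = 0 :=
    List.count_eq_zero.2 (fun h => by
      have h' := List.mem_takeWhile_imp h
      exact hne (beq_iff_eq.1 h'))
  rw [List.count_cons, List.count_append, h1]
  simp [Ne.symm hne]

-- B's run scan collects exactly the endpoints of edges of multiplicity 1
theorem pv_mem_collect (l : List (Int × Int)) (s : PySem.Set Int) (x : Int)
    (hp : l.Pairwise (fun a b => (toLex a : Lex (Int × Int)) ≤ toLex b)) :
    x ∈ pvCollectRuns l s
      ↔ x ∈ s ∨ ∃ e ∈ l, l.count e = 1 ∧ (x = e.1 ∨ x = e.2) := by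
  revert hp
  induction l, s using pvCollectRuns.induct with
  | case1 s => intro _; simp [pvCollectRuns]
  | case2 e rest s hc ih =>
    intro hp
    rw [List.pairwise_cons] at hp
    obtain ⟨hp1, hp2⟩ := hp
    have hd := pv_run_head_ne e rest hp1 hp2
    have hdr : rest.dropWhile (fun x => x == e) = rest := by
      have := List.takeWhile_append_dropWhile (p := fun x => x == e) (l := rest)
      rwa [hc, List.nil_append] at this
    have hce : (e :: rest).count e = 1 := by
      rw [pv_count_self e rest hd, hc]; rfl
    rw [pvCollectRuns, if_pos hc, ih (by rw [hdr]; exact hp2)]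
    rw [hdr] at hd ⊢
    simp only [PySem.Set.mem_add, List.mem_cons]
    constructor
    · rintro (((hx | hx) | hx) | ⟨f, hf, hcf, hx⟩)
      · exact Or.inl hx
      · exact Or.inr ⟨e, Or.inl rfl, hce, Or.inl hx⟩
      · exact Or.inr ⟨e, Or.inl rfl, hce, Or.inr hx⟩
      · exact Or.inr ⟨f, Or.inr hf,
          by rw [← hcf, pv_count_ne e f rest (hd f hf), hdr], hx⟩
    · rintro (hx | ⟨f, (rfl | hf), hcf, hx⟩)
      · exact Or.inl (Or.inl (Or.inl hx))
      · rcases hx with hx | hx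
        · exact Or.inl (Or.inl (Or.inr hx))
        · exact Or.inl (Or.inr hx)
      · exact Or.inr ⟨f, hf,
          by rw [← hcf, pv_count_ne e f rest (hd f hf), hdr], hx⟩
  | case3 e rest s hc ih =>
    intro hp
    rw [List.pairwise_cons] at hp
    obtain ⟨hp1, hp2⟩ := hp
    have hd := pv_run_head_ne e rest hp1 hp2
    have hpd : (rest.dropWhile (fun x => x == e)).Pairwise
        (fun a b => (toLex a : Lex (Int × Int)) ≤ toLex b) :=
      hp2.sublist (List.dropWhile_sublist _)
    have hce : (e :: rest).count e ≠ 1 := by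
      rw [pv_count_self e rest hd]
      have : (rest.takeWhile (fun x => x == e)).length ≠ 0 := by
        simpa [List.length_eq_zero_iff] using hc
      omega
    have hsub : (rest.dropWhile (fun x => x == e)).Sublist rest := List.dropWhile_sublist _
    rw [pvCollectRuns, if_neg hc, ih hpd]
    constructor
    · rintro (hx | ⟨f, hf, hcf, hx⟩)
      · exact Or.inl hx
      · exact Or.inr ⟨f, List.mem_cons_of_mem e (hsub.mem hf),
          by rw [pv_count_ne e f rest (hd f hf)]; exact hcf, hx⟩
    · rintro (hx | ⟨f, hf, hcf, hx⟩)
      · exact Or.inl hx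
      · rcases List.mem_cons.1 hf with rfl | hf
        · exact absurd hcf hce
        · have hfd : f ∈ rest.dropWhile (fun x => x == e) := by
            by_cases hfe : f = e
            · exact absurd (hfe ▸ hcf) hce
            · rcases (List.mem_append.1 (by
                rw [List.takeWhile_append_dropWhile]; exact hf :
                  f ∈ rest.takeWhile (fun x => x == e) ++ rest.dropWhile (fun x => x == e)))
                with h | h
              · exact absurd (by have h' := List.mem_takeWhile_imp h; exact beq_iff_eq.1 h') hfe
              · exact h
          exact Or.inr ⟨f, hfd,
            by rw [← pv_count_ne e f rest (hd f hfd)]; exact hcf, hx⟩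

-- the two ports agree: both return the strictly increasing list of endpoints of
-- edges of multiplicity 1 in the canonical edge list
theorem pv_main (vertices faces : List (Int × Int × Int)) :
    find_boundary_vertices vertices faces = find_boundary_vertices_alt vertices faces := by
  show PySem.List.sorted
      ((((faces.foldl (fun d face =>
            (pvFaceEdges face).foldl (fun d e => d.insert e (d.getD e 0 + 1)) d)
            PySem.Dict.empty).items.filter (fun p => p.2 == (1 : Int))).map Prod.fst).foldl
        (fun s e => PySem.Set.update s [e.1, e.2]) PySem.Set.empty) (fun x => x) false
    = PySem.List.sorted (pvCollectRuns
        (PySem.List.sorted2 (faces.foldl (fun acc face => acc ++ pvFaceEdges face) [])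
          Prod.fst Prod.snd false) PySem.Set.empty) (fun x => x) false
  rw [pv_dict_eq_counter, PySem.List.foldl_append_eq_flatMap pvFaceEdges faces [],
    List.nil_append, pv_sorted2_eq_sorted_toLex]
  have hperm : (PySem.List.sorted (faces.flatMap pvFaceEdges)
      (fun e => (toLex e : Lex (Int × Int))) false).Perm (faces.flatMap pvFaceEdges) :=
    PySem.List.sorted_perm _ _ _
  apply PySem.List.sorted_eq_sorted_of_perm _ _ _ (fun a b h => h)
  rw [List.perm_ext_iff_of_nodup
    (pv_nodup_vfold _ _ (by simp [PySem.Set.empty]))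
    (pv_nodup_collect _ _ (by simp [PySem.Set.empty]))]
  intro x
  rw [pv_mem_vfold, pv_mem_collect _ _ _ (PySem.List.sorted_pairwise _ _)]
  simp only [PySem.Set.empty, List.not_mem_nil, false_or]
  constructor
  · rintro ⟨e, hbe, hx⟩
    obtain ⟨hmem, hcnt⟩ := (pv_mem_boundary_edges _ e).1 hbe
    exact ⟨e, hperm.mem_iff.2 hmem, by rw [hperm.count_eq]; exact hcnt, hx⟩
  · rintro ⟨e, hmem, hcnt, hx⟩
    refine ⟨e, (pv_mem_boundary_edges _ e).2
      ⟨hperm.mem_iff.1 hmem, by rw [← hperm.count_eq]; exact hcnt⟩, hx⟩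

-- ===== VERDICT (by name: the statement is the Claim_ definition above) =====
theorem find_boundary_vertices_spec : Claim_equal_find_boundary_vertices := by
  intro vertices faces _
  unfold Spec_find_boundary_vertices
  exact pv_main vertices faces
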